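-- pv_equiv track=rewrite | github.com/Minoo7/TDDE24 | tenta/2021_08_17/cod.py | alternating_jumps
-- ===== SOURCE A (Python) =====
-- def alternating_jumps(seq1, seq2, maxjumps: int):
--     both_last = -4711
--     reached_max = -49152
--     outside_reach = -42
--     jumps = []
--     index_1, index_2 = 0, 0
--     while maxjumps > len(jumps):
--         distance = seq1[index_1]
--         if abs(index_2 + distance) > len(seq2)-1:
--             return (outside_reach, jumps)
--         index_2 += distance
--         jumps.append(distance)
--         if index_2 == len(seq2)-1 and index_1 == len(seq1)-1:
--             return (both_last, jumps)
--         if len(jumps) == maxjumps: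
--             return (reached_max, jumps)
--
--         distance = seq2[index_2]
--         if abs(index_1 + distance) > len(seq1)-1:
--             return (outside_reach, jumps)
--         index_1 += distance
--         jumps.append(distance)
--         if index_2 == len(seq2)-1 and index_1 == len(seq1)-1:
--             return (both_last, jumps)
--     return (reached_max, jumps)
-- ===== SOURCE B (Python) =====
-- def alternating_jumps(seq1, seq2, maxjumps: int):
--     # Memoized simulation: the walk's state (index_1, index_2, phase) lives in a
--     # finite space, so record each state's first position in a dict; when a state
--     # repeats, the remaining jumps are the detected cycle repeated, emitted in
--     # closed form (cycle * q + cycle[:r]) instead of jump-by-jump simulation.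
--     both_last, reached_max, outside_reach = -4711, -49152, -42
--     jumps = []
--     i1, i2, ph = 0, 0, 0
--     seen = {}
--     while len(jumps) < maxjumps:
--         state = (i1, i2, ph)
--         if state in seen:
--             cycle = jumps[seen[state]:]
--             q, r = divmod(maxjumps - len(jumps), len(cycle))
--             return (reached_max, jumps + cycle * q + cycle[:r])
--         seen[state] = len(jumps)
--         if ph == 0:
--             d = seq1[i1]
--             if abs(i2 + d) > len(seq2) - 1:
--                 return (outside_reach, jumps)
--             i2 += d
--         else:
--             d = seq2[i2]
--             if abs(i1 + d) > len(seq1) - 1: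
--                 return (outside_reach, jumps)
--             i1 += d
--         jumps.append(d)
--         if i2 == len(seq2) - 1 and i1 == len(seq1) - 1:
--             return (both_last, jumps)
--         ph = 1 - ph
--     return (reached_max, jumps)
-- ===== Notes on version B (the rewrite author's own statement) =====
-- stated objective: alternative
-- what changed: B replaces A's blind two-jumps-per-iteration simulation by a memoized walk: it records each visited (index_1, index_2, phase) state in a dict and, on the first repeated state, emits all remaining jumps at once as the detected cycle repeated (cycle * q + cycle[:r]), so the loop runs at most min(maxjumps, number of distinct states) iterations.
import Mathlib
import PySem

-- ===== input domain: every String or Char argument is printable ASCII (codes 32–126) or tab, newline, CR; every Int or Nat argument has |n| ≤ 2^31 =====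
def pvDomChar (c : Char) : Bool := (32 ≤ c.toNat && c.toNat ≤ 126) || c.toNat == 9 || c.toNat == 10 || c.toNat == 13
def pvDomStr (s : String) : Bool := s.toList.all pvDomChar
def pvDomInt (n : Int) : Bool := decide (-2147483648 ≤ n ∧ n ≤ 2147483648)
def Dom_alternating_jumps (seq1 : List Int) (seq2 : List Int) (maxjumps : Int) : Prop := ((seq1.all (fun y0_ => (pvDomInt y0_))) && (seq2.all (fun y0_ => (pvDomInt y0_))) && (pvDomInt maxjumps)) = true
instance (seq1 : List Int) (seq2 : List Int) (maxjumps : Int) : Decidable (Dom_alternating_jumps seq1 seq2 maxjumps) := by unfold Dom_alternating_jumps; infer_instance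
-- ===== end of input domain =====

-- B memoizes the walk's (index_1, index_2, phase) states in a dict and, on the first repeated
-- state, emits the remaining jumps in closed form as the detected cycle repeated
-- (objective: alternative algorithm — cycle detection instead of step-by-step simulation).

-- ===== PORT A =====
-- A's while loop: up to two jumps per iteration; fuel bounds the iteration count
-- (each continuing iteration appends two jumps while the guard needs jumps.length < maxjumps,
-- so maxjumps.toNat + 1 iterations never run out).  The `none` branches of pyGet? are the
-- IndexError cases (seq1 = [] with maxjumps > 0), excluded by Pre_.
def pvLoopA (seq1 seq2 : List Int) (maxjumps : Int) : Nat → Int → Int → List Int → Int × List Int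
  | 0, _, _, jumps => (-49152, jumps)
  | fuel+1, i1, i2, jumps =>
    if (jumps.length : Int) < maxjumps then
      match PySem.List.pyGet? seq1 i1 with
      | none => (0, jumps)   -- IndexError: unreachable inside Pre_
      | some d =>
        if (seq2.length : Int) - 1 < |i2 + d| then (-42, jumps)
        else
          let i2' := i2 + d
          let jumps1 := jumps ++ [d]
          if i2' = (seq2.length : Int) - 1 ∧ i1 = (seq1.length : Int) - 1 then (-4711, jumps1)
          else if (jumps1.length : Int) = maxjumps then (-49152, jumps1)
          else
            match PySem.List.pyGet? seq2 i2' with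
            | none => (0, jumps1)   -- IndexError: unreachable inside Pre_
            | some e =>
              if (seq1.length : Int) - 1 < |i1 + e| then (-42, jumps1)
              else
                let i1' := i1 + e
                let jumps2 := jumps1 ++ [e]
                if i2' = (seq2.length : Int) - 1 ∧ i1' = (seq1.length : Int) - 1 then (-4711, jumps2)
                else pvLoopA seq1 seq2 maxjumps fuel i1' i2' jumps2
    else (-49152, jumps)

def alternating_jumps (seq1 : List Int) (seq2 : List Int) (maxjumps : Int) : Int × List Int :=
  pvLoopA seq1 seq2 maxjumps (maxjumps.toNat + 1) 0 0 []

-- ===== PORT B =====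
-- B's while loop: one jump per iteration; `seen` maps each visited state (i1, i2, ph) to the
-- number of jumps made when it was first visited.  On a repeated state the remaining jumps are
-- the cycle jumps[seen[state]:] repeated: cycle * q + cycle[:r], (q, r) = divmod(rem, len(cycle))
-- (Python's list * int is ported as flattened replicate).  Fuel: one jump per continuing
-- iteration against the guard jumps.length < maxjumps, so maxjumps.toNat + 1 never runs out.
def pvLoopB (seq1 seq2 : List Int) (maxjumps : Int) :
    Nat → Int → Int → Int → List Int → PySem.Dict (Int × Int × Int) Int → Int × List Int
  | 0, _, _, _, jumps, _ => (-49152, jumps)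
  | fuel+1, i1, i2, ph, jumps, seen =>
    if (jumps.length : Int) < maxjumps then
      match seen.get? (i1, i2, ph) with
      | some start =>
        let cycle := PySem.List.slice jumps (some start) none
        match PySem.Int.divmod? (maxjumps - jumps.length) (cycle.length : Int) with
        | none => (0, jumps)   -- ZeroDivisionError: unreachable (the cycle is nonempty)
        | some qr =>
          (-49152, jumps ++ (List.replicate qr.1.toNat cycle).flatten
                          ++ PySem.List.slice cycle none (some qr.2))
      | none =>
        let seen1 := seen.insert (i1, i2, ph) (jumps.length : Int)
        if ph = 0 then
          match PySem.List.pyGet? seq1 i1 with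
          | none => (0, jumps)   -- IndexError: unreachable inside Pre_
          | some d =>
            if (seq2.length : Int) - 1 < |i2 + d| then (-42, jumps)
            else
              if i2 + d = (seq2.length : Int) - 1 ∧ i1 = (seq1.length : Int) - 1 then (-4711, jumps ++ [d])
              else pvLoopB seq1 seq2 maxjumps fuel i1 (i2 + d) (1 - ph) (jumps ++ [d]) seen1
        else
          match PySem.List.pyGet? seq2 i2 with
          | none => (0, jumps)   -- IndexError: unreachable inside Pre_
          | some d =>
            if (seq1.length : Int) - 1 < |i1 + d| then (-42, jumps)
            else
              if i2 = (seq2.length : Int) - 1 ∧ i1 + d = (seq1.length : Int) - 1 then (-4711, jumps ++ [d])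
              else pvLoopB seq1 seq2 maxjumps fuel (i1 + d) i2 (1 - ph) (jumps ++ [d]) seen1
    else (-49152, jumps)

def alternating_jumps_alt (seq1 : List Int) (seq2 : List Int) (maxjumps : Int) : Int × List Int :=
  pvLoopB seq1 seq2 maxjumps (maxjumps.toNat + 1) 0 0 0 [] PySem.Dict.empty

-- ===== PRECONDITION & SPEC =====
-- Pre_ excludes exactly the inputs where Python A raises IndexError: seq1 = [] with maxjumps > 0
-- (the loop body starts with seq1[0] on an empty list); B raises there too.
def Pre_alternating_jumps (seq1 : List Int) (seq2 : List Int) (maxjumps : Int) : Prop :=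
  seq1 ≠ [] ∨ maxjumps ≤ 0
instance (seq1 : List Int) (seq2 : List Int) (maxjumps : Int) : Decidable (Pre_alternating_jumps seq1 seq2 maxjumps) := by unfold Pre_alternating_jumps; infer_instance
def pvWitness_alternating_jumps : List Int × List Int × Int := ([1], [0, 0], 3)

def Spec_alternating_jumps (seq1 : List Int) (seq2 : List Int) (maxjumps : Int) (out : Int × List Int) : Prop := out = alternating_jumps_alt seq1 seq2 maxjumps
instance (seq1 : List Int) (seq2 : List Int) (maxjumps : Int) (out : Int × List Int) : Decidable (Spec_alternating_jumps seq1 seq2 maxjumps out) := by unfold Spec_alternating_jumps; infer_instance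

-- ===== CLAIM (what is proved, stated in full; the proofs are below) =====
def Claim_equal_alternating_jumps : Prop := ∀ (seq1 : List Int) (seq2 : List Int) (maxjumps : Int), Dom_alternating_jumps seq1 seq2 maxjumps → Pre_alternating_jumps seq1 seq2 maxjumps → Spec_alternating_jumps seq1 seq2 maxjumps (alternating_jumps seq1 seq2 maxjumps)

-- ===== LEMMAS AND PROOFS =====

-- Ghost single-step semantics shared by both proofs: one jump of the walk.
inductive PvSRes where
  | err : PvSRes                               -- IndexError
  | out : PvSRes                               -- outside_reach
  | last : Int → PvSRes                        -- both_last, with the jump just made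
  | cont : Int → Int → Int → Int → PvSRes      -- jump d, next state (i1, i2, ph)

def pvStep (seq1 seq2 : List Int) (i1 i2 ph : Int) : PvSRes :=
  if ph = 0 then
    match PySem.List.pyGet? seq1 i1 with
    | none => .err
    | some d =>
      if (seq2.length : Int) - 1 < |i2 + d| then .out
      else if i2 + d = (seq2.length : Int) - 1 ∧ i1 = (seq1.length : Int) - 1 then .last d
      else .cont d i1 (i2 + d) (1 - ph)
  else
    match PySem.List.pyGet? seq2 i2 with
    | none => .err
    | some d =>
      if (seq1.length : Int) - 1 < |i1 + d| then .out
      else if i2 = (seq2.length : Int) - 1 ∧ i1 + d = (seq1.length : Int) - 1 then .last d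
      else .cont d (i1 + d) i2 (1 - ph)

-- Ghost reference loop: one jump per iteration, driven by pvStep.
def pvRun (seq1 seq2 : List Int) (maxjumps : Int) : Nat → Int → Int → Int → List Int → Int × List Int
  | 0, _, _, _, jumps => (-49152, jumps)
  | fuel+1, i1, i2, ph, jumps =>
    if (jumps.length : Int) < maxjumps then
      match pvStep seq1 seq2 i1 i2 ph with
      | .err => (0, jumps)
      | .out => (-42, jumps)
      | .last d => (-4711, jumps ++ [d])
      | .cont d j1 j2 ph' => pvRun seq1 seq2 maxjumps fuel j1 j2 ph' (jumps ++ [d])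
    else (-49152, jumps)

-- `PvRuns st c st'` : from state st the walk makes |c| continuing jumps c and reaches st'.
inductive PvRuns (seq1 seq2 : List Int) : Int × Int × Int → List Int → Int × Int × Int → Prop where
  | nil (st : Int × Int × Int) : PvRuns seq1 seq2 st [] st
  | cons {i1 i2 ph d j1 j2 ph' : Int} {c : List Int} {st'' : Int × Int × Int} :
      pvStep seq1 seq2 i1 i2 ph = .cont d j1 j2 ph' →
      PvRuns seq1 seq2 (j1, j2, ph') c st'' →
      PvRuns seq1 seq2 (i1, i2, ph) (d :: c) st''

lemma pvRuns_snoc {seq1 seq2 : List Int} {st st' : Int × Int × Int} {c : List Int}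
    {d j1 j2 ph' : Int}
    (h : PvRuns seq1 seq2 st c st')
    (hs : pvStep seq1 seq2 st'.1 st'.2.1 st'.2.2 = .cont d j1 j2 ph') :
    PvRuns seq1 seq2 st (c ++ [d]) (j1, j2, ph') := by
  induction h with
  | nil st0 =>
    obtain ⟨a, b, p⟩ := st0
    exact PvRuns.cons hs (PvRuns.nil _)
  | cons h1 _ ih => exact PvRuns.cons h1 (ih hs)

-- pvRun stops immediately when the jump budget is exhausted.
lemma pvRun_stop {seq1 seq2 : List Int} {maxjumps : Int} {jumps : List Int}
    (h : maxjumps ≤ (jumps.length : Int)) (fuel : Nat) (i1 i2 ph : Int) :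
    pvRun seq1 seq2 maxjumps fuel i1 i2 ph jumps = (-49152, jumps) := by
  cases fuel with
  | zero => rfl
  | succ f => simp only [pvRun]; rw [if_neg (by omega)]

-- Any two fuels at least the remaining budget give the same run.
lemma pvRun_fuel {seq1 seq2 : List Int} {maxjumps : Int} :
    ∀ (f₁ f₂ : Nat) (i1 i2 ph : Int) (jumps : List Int),
      (maxjumps - jumps.length).toNat ≤ f₁ → (maxjumps - jumps.length).toNat ≤ f₂ →
      pvRun seq1 seq2 maxjumps f₁ i1 i2 ph jumps = pvRun seq1 seq2 maxjumps f₂ i1 i2 ph jumps := by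
  intro f₁
  induction f₁ with
  | zero =>
    intro f₂ i1 i2 ph jumps h1 _
    rw [pvRun_stop (by omega), pvRun_stop (by omega)]
  | succ f ih =>
    intro f₂ i1 i2 ph jumps h1 h2
    by_cases hg : (jumps.length : Int) < maxjumps
    · cases f₂ with
      | zero => omega
      | succ f₂' =>
        simp only [pvRun, if_pos hg]
        cases hs : pvStep seq1 seq2 i1 i2 ph with
        | cont d j1 j2 ph' =>
          exact ih f₂' j1 j2 ph' (jumps ++ [d])
            (by simp only [List.length_append, List.length_cons, List.length_nil]; omega)
            (by simp only [List.length_append, List.length_cons, List.length_nil]; omega)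
        | err => rfl
        | out => rfl
        | last d => rfl
    · rw [pvRun_stop (by omega), pvRun_stop (by omega)]

-- Running a continuing segment appends its jumps and consumes as much fuel.
lemma pvRun_seg {seq1 seq2 : List Int} {maxjumps : Int} {st st' : Int × Int × Int} {c : List Int}
    (h : PvRuns seq1 seq2 st c st') :
    ∀ (fuel : Nat) (jumps : List Int),
      (c.length : Int) ≤ maxjumps - jumps.length → c.length ≤ fuel →
      pvRun seq1 seq2 maxjumps fuel st.1 st.2.1 st.2.2 jumps
        = pvRun seq1 seq2 maxjumps (fuel - c.length) st'.1 st'.2.1 st'.2.2 (jumps ++ c) := by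
  induction h with
  | nil => intro fuel jumps _ _; simp
  | @cons i1 i2 ph d j1 j2 ph' c st'' h1 h2 ih =>
    intro fuel jumps hrem hfuel
    cases fuel with
    | zero => simp at hfuel
    | succ f =>
      simp only [List.length_cons] at hrem hfuel
      have hg : (jumps.length : Int) < maxjumps := by push_cast at hrem; omega
      simp only [pvRun, if_pos hg, h1]
      have := ih f (jumps ++ [d])
        (by simp only [List.length_append, List.length_cons, List.length_nil]; push_cast at hrem ⊢; omega)
        (by omega)
      simpa using this

-- If the walk continues along c but the budget runs out within c, the run is reached_max
-- with the first (maxjumps - jumps.length) jumps of c appended.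
lemma pvRun_trunc {seq1 seq2 : List Int} {maxjumps : Int} {st st' : Int × Int × Int} {c : List Int}
    (h : PvRuns seq1 seq2 st c st') :
    ∀ (fuel : Nat) (jumps : List Int),
      maxjumps - jumps.length ≤ (c.length : Int) → (maxjumps - jumps.length).toNat ≤ fuel →
      pvRun seq1 seq2 maxjumps fuel st.1 st.2.1 st.2.2 jumps
        = (-49152, jumps ++ c.take (maxjumps - jumps.length).toNat) := by
  induction h with
  | nil =>
    intro fuel jumps hrem _
    simp only [List.length_nil] at hrem
    rw [pvRun_stop (by omega)]
    have h0 : (maxjumps - (jumps.length : Int)).toNat = 0 := by omega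
    simp [h0]
  | @cons i1 i2 ph d j1 j2 ph' c st'' h1 h2 ih =>
    intro fuel jumps hrem hfuel
    by_cases hg : (jumps.length : Int) < maxjumps
    · cases fuel with
      | zero => omega
      | succ f =>
        simp only [pvRun, if_pos hg, h1]
        have := ih f (jumps ++ [d])
          (by simp only [List.length_append, List.length_cons, List.length_nil] at *; push_cast at hrem ⊢; omega)
          (by simp only [List.length_append, List.length_cons, List.length_nil]; omega)
        rw [this]
        have hto : (maxjumps - ((jumps ++ [d]).length : Int)).toNat + 1
            = (maxjumps - (jumps.length : Int)).toNat := by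
          simp only [List.length_append, List.length_cons, List.length_nil]; omega
        rw [← hto]
        simp [List.take_succ_cons]
    · rw [pvRun_stop (by omega)]
      have h0 : (maxjumps - (jumps.length : Int)).toNat = 0 := by omega
      simp [h0]

-- A detected cycle determines the whole remaining run in closed form.
lemma pvRun_cycle {seq1 seq2 : List Int} {maxjumps : Int} {st : Int × Int × Int} {c : List Int}
    (h : PvRuns seq1 seq2 st c st) (hc : c ≠ []) :
    ∀ (fuel : Nat) (jumps : List Int), (maxjumps - jumps.length).toNat ≤ fuel →
      pvRun seq1 seq2 maxjumps fuel st.1 st.2.1 st.2.2 jumps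
        = (-49152, jumps ++ (List.replicate ((maxjumps - jumps.length).toNat / c.length) c).flatten
                          ++ c.take ((maxjumps - jumps.length).toNat % c.length)) := by
  intro fuel
  induction fuel using Nat.strong_induction_on with
  | _ fuel ih =>
    intro jumps hfuel
    have hcl : 0 < c.length := List.length_pos_of_ne_nil hc
    by_cases hlt : (maxjumps - (jumps.length : Int)).toNat < c.length
    · rw [pvRun_trunc h fuel jumps (by omega) hfuel,
        Nat.div_eq_of_lt hlt, Nat.mod_eq_of_lt hlt]
      simp
    · rw [not_lt] at hlt
      have hrem : (c.length : Int) ≤ maxjumps - jumps.length := by omega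
      rw [pvRun_seg h fuel jumps hrem (by omega)]
      have hfl : fuel - c.length < fuel := by omega
      rw [ih (fuel - c.length) hfl (jumps ++ c)
        (by simp only [List.length_append]; omega)]
      have hto : (maxjumps - ((jumps ++ c).length : Int)).toNat
          = (maxjumps - (jumps.length : Int)).toNat - c.length := by
        simp only [List.length_append]; omega
      rw [hto]
      set n := (maxjumps - (jumps.length : Int)).toNat with hn
      obtain ⟨k, hk⟩ := Nat.exists_eq_add_of_le hlt
      have hq : n / c.length = (n - c.length) / c.length + 1 := by
        rw [hk, Nat.add_comm, Nat.add_div_right _ hcl, Nat.add_sub_cancel]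
      have hm : n % c.length = (n - c.length) % c.length := by
        rw [hk, Nat.add_comm, Nat.add_mod_right, Nat.add_sub_cancel]
      rw [hq, hm, List.replicate_succ, List.flatten_cons]
      simp [List.append_assoc]

-- A's two-jump loop body equals two steps of the ghost loop (fuels linked by f ↦ 2*f).
lemma pvLoopA_eq_pvRun (seq1 seq2 : List Int) (maxjumps : Int) :
    ∀ (f : Nat) (i1 i2 : Int) (jumps : List Int),
      pvLoopA seq1 seq2 maxjumps f i1 i2 jumps
        = pvRun seq1 seq2 maxjumps (2 * f) i1 i2 0 jumps := by
  intro f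
  induction f with
  | zero => intro i1 i2 jumps; rfl
  | succ f ih =>
    intro i1 i2 jumps
    have hf : 2 * (f + 1) = (2 * f + 1) + 1 := by ring
    rw [hf]
    simp only [pvLoopA, pvRun]
    by_cases h : (jumps.length : Int) < maxjumps
    · simp only [if_pos h]
      cases hg1 : PySem.List.pyGet? seq1 i1 with
      | none =>
        have hs : pvStep seq1 seq2 i1 i2 0 = .err := by simp [pvStep, hg1]
        rw [hs]
      | some d =>
        by_cases ho1 : (seq2.length : Int) - 1 < |i2 + d|
        · have hs : pvStep seq1 seq2 i1 i2 0 = .out := by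
            simp only [pvStep, hg1, if_true]; rw [if_pos ho1]
          rw [hs]; simp only [if_pos ho1]
        · by_cases hb1 : i2 + d = (seq2.length : Int) - 1 ∧ i1 = (seq1.length : Int) - 1
          · have hs : pvStep seq1 seq2 i1 i2 0 = .last d := by
              simp only [pvStep, hg1, if_true]; rw [if_neg ho1, if_pos hb1]
            rw [hs]; simp only [if_neg ho1, if_pos hb1]
          · have hs : pvStep seq1 seq2 i1 i2 0 = .cont d i1 (i2 + d) 1 := by
              simp only [pvStep, hg1, if_true]; rw [if_neg ho1, if_neg hb1]; norm_num
            rw [hs]; simp only [if_neg ho1, if_neg hb1]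
            -- second ghost step
            have hlen : ((jumps ++ [d]).length : Int) = (jumps.length : Int) + 1 := by simp
            by_cases hm : ((jumps ++ [d]).length : Int) = maxjumps
            · rw [if_pos hm, if_neg (by omega : ¬ ((jumps ++ [d]).length : Int) < maxjumps)]
            · have hg : ((jumps ++ [d]).length : Int) < maxjumps := by omega
              rw [if_neg hm, if_pos hg]
              cases hg2 : PySem.List.pyGet? seq2 (i2 + d) with
              | none =>
                have hs2 : pvStep seq1 seq2 i1 (i2 + d) 1 = .err := by
                  rw [pvStep, if_neg (by norm_num : ¬ (1:Int) = 0), hg2]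
                rw [hs2]
              | some e =>
                by_cases ho2 : (seq1.length : Int) - 1 < |i1 + e|
                · have hs2 : pvStep seq1 seq2 i1 (i2 + d) 1 = .out := by
                    rw [pvStep, if_neg (by norm_num : ¬ (1:Int) = 0), hg2]
                    dsimp only
                    rw [if_pos ho2]
                  rw [hs2]; simp only [if_pos ho2]
                · by_cases hb2 : i2 + d = (seq2.length : Int) - 1 ∧ i1 + e = (seq1.length : Int) - 1
                  · have hs2 : pvStep seq1 seq2 i1 (i2 + d) 1 = .last e := by
                      rw [pvStep, if_neg (by norm_num : ¬ (1:Int) = 0), hg2]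
                      dsimp only
                      rw [if_neg ho2, if_pos hb2]
                    rw [hs2]; simp only [if_neg ho2, if_pos hb2]
                  · have hs2 : pvStep seq1 seq2 i1 (i2 + d) 1 = .cont e (i1 + e) (i2 + d) 0 := by
                      rw [pvStep, if_neg (by norm_num : ¬ (1:Int) = 0), hg2]
                      dsimp only
                      rw [if_neg ho2, if_neg hb2]
                      norm_num
                    rw [hs2]; simp only [if_neg ho2, if_neg hb2]
                    exact ih (i1 + e) (i2 + d) ((jumps ++ [d]) ++ [e])
    · simp only [if_neg h]

lemma pvDivmod_some (a b : Int) (h : b ≠ 0) :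
    PySem.Int.divmod? a b = some (PySem.Int.floordiv a b, PySem.Int.mod a b) := by
  simp [PySem.Int.divmod?, PySem.Int.floordiv, PySem.Int.mod, h]

-- B's memoized loop equals the ghost loop: every `seen` entry records a provable fact
-- about the jumps already made (its state reaches the current state along jumps[j:]).
lemma pvLoopB_eq_pvRun (seq1 seq2 : List Int) (maxjumps : Int) :
    ∀ (fuel : Nat) (i1 i2 ph : Int) (jumps : List Int) (seen : PySem.Dict (Int × Int × Int) Int),
      (∀ st j, seen.get? st = some j → 0 ≤ j ∧ j < (jumps.length : Int) ∧
          PvRuns seq1 seq2 st (jumps.drop j.toNat) (i1, i2, ph)) →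
      (maxjumps - jumps.length).toNat ≤ fuel →
      pvLoopB seq1 seq2 maxjumps fuel i1 i2 ph jumps seen
        = pvRun seq1 seq2 maxjumps fuel i1 i2 ph jumps := by
  intro fuel
  induction fuel with
  | zero => intro i1 i2 ph jumps seen _ _; rfl
  | succ f ih =>
    intro i1 i2 ph jumps seen hinv hfuel
    simp only [pvLoopB]
    by_cases hg : (jumps.length : Int) < maxjumps
    · simp only [if_pos hg]
      cases hseen : seen.get? (i1, i2, ph) with
      | some start =>
        obtain ⟨hj0, hjlt, hruns⟩ := hinv _ _ hseen
        have hdrop : PySem.List.slice jumps (some start) none = jumps.drop start.toNat :=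
          PySem.List.slice_from _ hj0
        have hcne : jumps.drop start.toNat ≠ [] := by
          intro hnil
          rw [List.drop_eq_nil_iff] at hnil
          omega
        have hcl : 0 < (jumps.drop start.toNat).length := List.length_pos_of_ne_nil hcne
        have hne : ((jumps.drop start.toNat).length : Int) ≠ 0 := by
          exact_mod_cast hcl.ne'
        have hdm := pvDivmod_some (maxjumps - (jumps.length : Int))
          ((jumps.drop start.toNat).length : Int) hne
        simp only [hdrop]
        rw [hdm]
        have H := pvRun_cycle hruns hcne (f + 1) jumps hfuel
        rw [(H : pvRun seq1 seq2 maxjumps (f + 1) i1 i2 ph jumps = _)]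
        -- identify quotient/remainder
        have hrem0 : 0 ≤ maxjumps - (jumps.length : Int) := by omega
        obtain ⟨m, hm⟩ : ∃ m : Nat, maxjumps - (jumps.length : Int) = (m : Int) :=
          ⟨(maxjumps - (jumps.length : Int)).toNat, by omega⟩
        have hmt : (maxjumps - (jumps.length : Int)).toNat = m := by omega
        have hq : (PySem.Int.floordiv (maxjumps - jumps.length)
            ((jumps.drop start.toNat).length : Int)).toNat
            = (maxjumps - (jumps.length : Int)).toNat / (jumps.drop start.toNat).length := by
          rw [hm, PySem.Int.floordiv_natCast]
          simp only [Int.toNat_natCast]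
        have hr : PySem.Int.mod (maxjumps - jumps.length) ((jumps.drop start.toNat).length : Int)
            = ((maxjumps - (jumps.length : Int)).toNat % (jumps.drop start.toNat).length : Nat) := by
          rw [hm, PySem.Int.mod_natCast]
          simp only [Int.toNat_natCast]
        have hslice : PySem.List.slice (jumps.drop start.toNat) none
            (some ((maxjumps - (jumps.length : Int)).toNat % (jumps.drop start.toNat).length : Nat))
            = (jumps.drop start.toNat).take
                ((maxjumps - (jumps.length : Int)).toNat % (jumps.drop start.toNat).length) :=
          PySem.List.slice_to_natCast _ _
        simp only [hq, hr, hslice]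
      | none =>
        conv_rhs => rw [pvRun]
        simp only [if_pos hg]
        -- invariant after inserting the current state
        have hinv1 : ∀ (d j1 j2 ph' : Int),
            pvStep seq1 seq2 i1 i2 ph = .cont d j1 j2 ph' →
            ∀ st j, (seen.insert (i1, i2, ph) (jumps.length : Int)).get? st = some j →
              0 ≤ j ∧ j < ((jumps ++ [d]).length : Int) ∧
              PvRuns seq1 seq2 st ((jumps ++ [d]).drop j.toNat) (j1, j2, ph') := by
          intro d j1 j2 ph' hstep st j hget
          rw [PySem.Dict.get?_insert] at hget
          by_cases hst : st = (i1, i2, ph)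
          · rw [if_pos hst] at hget
            obtain rfl : j = (jumps.length : Int) := by injection hget with h; omega
            refine ⟨by positivity, by simp, ?_⟩
            rw [hst]
            have : ((jumps.length : Int)).toNat = jumps.length := by omega
            rw [this, List.drop_left]
            exact PvRuns.cons hstep (PvRuns.nil _)
          · rw [if_neg hst] at hget
            obtain ⟨hj0, hjlt, hruns⟩ := hinv st j hget
            refine ⟨hj0, by simp only [List.length_append, List.length_cons, List.length_nil]; omega, ?_⟩
            rw [List.drop_append_of_le_length (by omega)]
            exact pvRuns_snoc hruns hstep
        by_cases hph : ph = 0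
        · simp only [if_pos hph]
          cases hg1 : PySem.List.pyGet? seq1 i1 with
          | none =>
            have hs : pvStep seq1 seq2 i1 i2 ph = .err := by
              simp only [pvStep, hph, hg1, if_true]
            rw [hs]
          | some d =>
            by_cases ho1 : (seq2.length : Int) - 1 < |i2 + d|
            · have hs : pvStep seq1 seq2 i1 i2 ph = .out := by
                simp only [pvStep, hph, hg1, if_true]; rw [if_pos ho1]
              rw [hs]; simp only [if_pos ho1]
            · by_cases hb1 : i2 + d = (seq2.length : Int) - 1 ∧ i1 = (seq1.length : Int) - 1
              · have hs : pvStep seq1 seq2 i1 i2 ph = .last d := by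
                  simp only [pvStep, hph, hg1, if_true]; rw [if_neg ho1, if_pos hb1]
                rw [hs]; simp only [if_neg ho1, if_pos hb1]
              · have hs : pvStep seq1 seq2 i1 i2 ph = .cont d i1 (i2 + d) (1 - ph) := by
                  simp only [pvStep, hph, hg1, if_true]; rw [if_neg ho1, if_neg hb1]
                rw [hs]; simp only [if_neg ho1, if_neg hb1]
                exact ih i1 (i2 + d) (1 - ph) (jumps ++ [d]) _
                  (hinv1 d i1 (i2 + d) (1 - ph) hs)
                  (by simp only [List.length_append, List.length_cons, List.length_nil]; omega)
        · simp only [if_neg hph]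
          cases hg2 : PySem.List.pyGet? seq2 i2 with
          | none =>
            have hs : pvStep seq1 seq2 i1 i2 ph = .err := by
              rw [pvStep, if_neg hph, hg2]
            rw [hs]
          | some d =>
            by_cases ho2 : (seq1.length : Int) - 1 < |i1 + d|
            · have hs : pvStep seq1 seq2 i1 i2 ph = .out := by
                rw [pvStep, if_neg hph, hg2]
                dsimp only
                rw [if_pos ho2]
              rw [hs]; simp only [if_pos ho2]
            · by_cases hb2 : i2 = (seq2.length : Int) - 1 ∧ i1 + d = (seq1.length : Int) - 1
              · have hs : pvStep seq1 seq2 i1 i2 ph = .last d := by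
                  rw [pvStep, if_neg hph, hg2]
                  dsimp only
                  rw [if_neg ho2, if_pos hb2]
                rw [hs]; simp only [if_neg ho2, if_pos hb2]
              · have hs : pvStep seq1 seq2 i1 i2 ph = .cont d (i1 + d) i2 (1 - ph) := by
                  rw [pvStep, if_neg hph, hg2]
                  dsimp only
                  rw [if_neg ho2, if_neg hb2]
                rw [hs]; simp only [if_neg ho2, if_neg hb2]
                exact ih (i1 + d) i2 (1 - ph) (jumps ++ [d]) _
                  (hinv1 d (i1 + d) i2 (1 - ph) hs)
                  (by simp only [List.length_append, List.length_cons, List.length_nil]; omega)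
    · simp only [if_neg hg]
      rw [pvRun_stop (by omega)]

-- ===== VERDICT (by name: the statement is the Claim_ definition above) =====
theorem alternating_jumps_spec : Claim_equal_alternating_jumps := by
  intro seq1 seq2 maxjumps _ _
  unfold Spec_alternating_jumps alternating_jumps alternating_jumps_alt
  rw [pvLoopA_eq_pvRun, pvLoopB_eq_pvRun seq1 seq2 maxjumps (maxjumps.toNat + 1) 0 0 0 []
    PySem.Dict.empty (by intro st j hj; simp [PySem.Dict.get?_empty] at hj)
    (by simp only [List.length_nil]; omega)]
  exact pvRun_fuel _ _ _ _ _ _ (by simp only [List.length_nil]; omega)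
    (by simp only [List.length_nil]; omega)
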